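-- pv_equiv track=rewrite | github.com/GeniaHarrietBoeing/Rosalind | SQ.py | contains_square
-- ===== SOURCE A (Python) =====
-- def contains_square(A):
--     for i in range(1, len(A)-1):
--         for j in range(i+1, len(A)):
--                 common_node = 0
--                 for k in range(1, len(A)):
--                     if A[i][k] == 1 and A[j][k] == 1:
--                         common_node += 1
--                 if common_node >= 2:
--                     return 1
--     return -1
-- ===== SOURCE B (Python) =====
-- def contains_square(A):
--     # Pigeonhole C4-detection: for each row record its pairs of 1-columns; a pair
--     # seen in two different rows means two rows share two common 1-columns.
--     n = len(A)
--     seen = set()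
--     for i in range(1, n):
--         row = A[i]
--         cols = [k for k, v in enumerate(row) if 1 <= k < n and v == 1]
--         rest = cols
--         while rest:
--             a, rest = rest[0], rest[1:]
--             for b in rest:
--                 p = (a, b)
--                 if p in seen:
--                     return 1
--                 seen.add(p)
--     return -1
-- ===== Notes on version B (the rewrite author's own statement) =====
-- stated objective: faster
-- what changed: Instead of A's triple loop comparing every pair of rows column by column, B makes one pass over the rows, records each row's pairs of 1-columns in a set, and returns 1 at the first pair seen twice; by pigeonhole at most O(V^2) pairs are ever inserted.
-- outside the precondition, e.g. on contains_square([[], [0, 1, 1, 1], [0, 1, 1, 1], [0]]): A returns 1, B returns 1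
import Mathlib
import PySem

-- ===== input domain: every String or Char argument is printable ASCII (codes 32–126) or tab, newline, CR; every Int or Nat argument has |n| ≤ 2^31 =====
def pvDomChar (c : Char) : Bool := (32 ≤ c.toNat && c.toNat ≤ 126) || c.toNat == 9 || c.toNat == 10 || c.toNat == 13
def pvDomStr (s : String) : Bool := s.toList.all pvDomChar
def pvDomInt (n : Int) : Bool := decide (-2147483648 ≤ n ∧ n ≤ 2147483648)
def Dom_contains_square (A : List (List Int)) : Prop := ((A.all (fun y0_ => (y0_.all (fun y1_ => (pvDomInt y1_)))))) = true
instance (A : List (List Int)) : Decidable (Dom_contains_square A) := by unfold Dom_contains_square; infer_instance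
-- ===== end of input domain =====

-- B detects a C4 (two rows sharing two common 1-columns) by recording each row's pairs of
-- 1-columns in a set and stopping at the first repeated pair (pigeonhole: O(V^2) pair
-- insertions in total), instead of A's triple loop over row pairs and columns.

-- ===== PORT A =====
-- pyGetD is exact here: Pre_ keeps every accessed index in range.
def contains_square (A : List (List Int)) : Int :=
  match (PySem.List.pyRange 1 ((A.length : Int) - 1) 1).findSome? (fun i =>
    (PySem.List.pyRange (i + 1) (A.length : Int) 1).findSome? (fun j =>
      let common : Int := (PySem.List.pyRange 1 (A.length : Int) 1).foldl (fun acc k =>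
        if PySem.List.pyGetD (PySem.List.pyGetD A i []) k 0 == 1 &&
           PySem.List.pyGetD (PySem.List.pyGetD A j []) k 0 == 1
        then acc + 1 else acc) 0
      if 2 ≤ common then some (1 : Int) else none)) with
  | some v => v
  | none => -1

-- ===== PORT B =====
-- 'for b in rest: if p in seen: return 1; seen.add(p)' — none = found a repeated pair
def pvScan (a : Int) : PySem.Set (Int × Int) → List Int → Option (PySem.Set (Int × Int))
  | seen, [] => some seen
  | seen, b :: bs =>
      if PySem.Set.contains seen (a, b) then none
      else pvScan a (PySem.Set.add seen (a, b)) bs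

-- 'while rest: a, rest = rest[0], rest[1:]; …'
def pvRow : PySem.Set (Int × Int) → List Int → Option (PySem.Set (Int × Int))
  | seen, [] => some seen
  | seen, a :: rest =>
      match pvScan a seen rest with
      | none => none
      | some s => pvRow s rest

-- cols = [k for k, v in enumerate(row) if 1 <= k < n and v == 1]
def pvColsOf (n : Int) (row : List Int) : List Int :=
  ((PySem.List.enumerate row 0).filter
    (fun p => decide (1 ≤ p.1 ∧ p.1 < n) && (p.2 == 1))).map (fun p => p.1)

-- 'for i in range(1, n): …'
def pvRows (A : List (List Int)) (n : Int) : PySem.Set (Int × Int) → List Int → Int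
  | _, [] => -1
  | seen, i :: is =>
      match pvRow seen (pvColsOf n (PySem.List.pyGetD A i [])) with
      | none => 1
      | some s => pvRows A n s is

def contains_square_alt (A : List (List Int)) : Int :=
  pvRows A (A.length : Int) PySem.Set.empty (PySem.List.pyRange 1 (A.length : Int) 1)

-- ===== PRECONDITION & SPEC =====
-- Pre_ excludes matrices (with ≥ 3 rows) in which some row past the first is shorter than
-- len(A): A indexes columns 1..len(A)-1 of such rows and raises IndexError there unless an
-- earlier pair of rows already returned 1, and B indexes the same columns of every row.
def Pre_contains_square (A : List (List Int)) : Prop :=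
  2 < A.length → ∀ row ∈ A.drop 1, A.length ≤ row.length
instance (A : List (List Int)) : Decidable (Pre_contains_square A) := by
  unfold Pre_contains_square; infer_instance

def pvWitness_contains_square : List (List Int) := [[0, 0, 0], [0, 1, 1], [0, 1, 1]]

def Spec_contains_square (A : List (List Int)) (out : Int) : Prop := out = contains_square_alt A
instance (A : List (List Int)) (out : Int) : Decidable (Spec_contains_square A out) := by
  unfold Spec_contains_square; infer_instance

-- ===== CLAIM (what is proved, stated in full; the proofs are below) =====
def Claim_equal_contains_square : Prop :=
  ∀ (A : List (List Int)), Dom_contains_square A → Pre_contains_square A →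
    Spec_contains_square A (contains_square A)

-- ===== LEMMAS AND PROOFS =====

-- the entry A[i][k], as the A-port reads it
def pvEnt (A : List (List Int)) (i k : Int) : Int :=
  PySem.List.pyGetD (PySem.List.pyGetD A i []) k 0


-- all ordered pairs (earlier element, later element) of a list
def pvPairsList : List Int → List (Int × Int)
  | [] => []
  | a :: rest => rest.map (fun b => (a, b)) ++ pvPairsList rest

lemma pvPairsList_mem_comps {p : Int × Int} {c : List Int} (h : p ∈ pvPairsList c) :
    p.1 ∈ c ∧ p.2 ∈ c := by
  induction c with
  | nil => simp [pvPairsList] at h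
  | cons a rest ih =>
    simp only [pvPairsList, List.mem_append, List.mem_map] at h
    rcases h with ⟨b, hb, rfl⟩ | h
    · exact ⟨by simp, by simp [hb]⟩
    · rcases ih h with ⟨h1, h2⟩
      exact ⟨by simp [h1], by simp [h2]⟩

lemma mem_pvPairsList {c : List Int} (hs : c.Pairwise (· < ·)) (a b : Int) :
    (a, b) ∈ pvPairsList c ↔ a ∈ c ∧ b ∈ c ∧ a < b := by
  induction c with
  | nil => simp [pvPairsList]
  | cons x rest ih =>
    rcases List.pairwise_cons.mp hs with ⟨hx, hrest⟩
    simp only [pvPairsList, List.mem_append, List.mem_map, List.mem_cons]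
    constructor
    · rintro (⟨b', hb', h⟩ | h)
      · obtain ⟨rfl, rfl⟩ : a = x ∧ b = b' := by
          have := congrArg Prod.fst h; have := congrArg Prod.snd h
          simp_all
        exact ⟨Or.inl rfl, Or.inr hb', hx _ hb'⟩
      · rcases (ih hrest).mp h with ⟨h1, h2, h3⟩
        exact ⟨Or.inr h1, Or.inr h2, h3⟩
    · rintro ⟨(rfl | ha), (rfl | hb), hab⟩
      · exact absurd hab (lt_irrefl _)
      · exact Or.inl ⟨b, hb, rfl⟩
      · exact absurd hab (not_lt.mpr (le_of_lt (hx _ ha)))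
      · exact Or.inr ((ih hrest).mpr ⟨ha, hb, hab⟩)

lemma pvScan_eq_none_iff {a : Int} {bs : List Int} (hnd : bs.Nodup) :
    ∀ seen : PySem.Set (Int × Int), (pvScan a seen bs = none ↔ ∃ b ∈ bs, (a, b) ∈ seen) := by
  induction bs with
  | nil => intro seen; simp [pvScan]
  | cons b bs ih =>
    intro seen
    rcases List.nodup_cons.mp hnd with ⟨hb, hnd'⟩
    by_cases hc : (a, b) ∈ seen
    · have hstep : pvScan a seen (b :: bs) = none := by simp [pvScan, hc]
      rw [hstep]
      exact iff_of_true rfl ⟨b, by simp, hc⟩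
    · have hstep : pvScan a seen (b :: bs) = pvScan a (PySem.Set.add seen (a, b)) bs := by
        simp [pvScan, hc]
      rw [hstep, ih hnd' (PySem.Set.add seen (a, b))]
      simp only [PySem.Set.mem_add, List.mem_cons]
      constructor
      · rintro ⟨b', hb', hmem | heq⟩
        · exact ⟨b', Or.inr hb', hmem⟩
        · have : b' = b := by simpa using heq
          exact absurd (this ▸ hb') hb
      · rintro ⟨b', (rfl | hb'), hmem⟩
        · exact absurd hmem hc
        · exact ⟨b', hb', Or.inl hmem⟩

lemma pvScan_eq_some_mem {a : Int} {bs : List Int} :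
    ∀ {seen s : PySem.Set (Int × Int)}, pvScan a seen bs = some s →
      ∀ q, (q ∈ s ↔ q ∈ seen ∨ ∃ b ∈ bs, q = (a, b)) := by
  induction bs with
  | nil => intro seen s h q; simp only [pvScan, Option.some.injEq] at h; simp [← h]
  | cons b bs ih =>
    intro seen s h q
    by_cases hc : (a, b) ∈ seen
    · simp [pvScan, hc] at h
    · have hstep : pvScan a seen (b :: bs) = pvScan a (PySem.Set.add seen (a, b)) bs := by
        simp [pvScan, hc]
      rw [hstep] at h
      rw [ih h q]
      simp only [PySem.Set.mem_add, List.mem_cons]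
      constructor
      · rintro ((hq | rfl) | ⟨b', hb', rfl⟩)
        · exact Or.inl hq
        · exact Or.inr ⟨b, Or.inl rfl, rfl⟩
        · exact Or.inr ⟨b', Or.inr hb', rfl⟩
      · rintro (hq | ⟨b', (rfl | hb'), rfl⟩)
        · exact Or.inl (Or.inl hq)
        · exact Or.inl (Or.inr rfl)
        · exact Or.inr ⟨b', hb', rfl⟩

lemma pvScan_eq_some_nodup {a : Int} {bs : List Int} :
    ∀ {seen s : PySem.Set (Int × Int)}, pvScan a seen bs = some s → seen.Nodup → s.Nodup := by
  induction bs with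
  | nil => intro seen s h hn; simp only [pvScan, Option.some.injEq] at h; exact h ▸ hn
  | cons b bs ih =>
    intro seen s h hn
    by_cases hc : (a, b) ∈ seen
    · simp [pvScan, hc] at h
    · have hstep : pvScan a seen (b :: bs) = pvScan a (PySem.Set.add seen (a, b)) bs := by
        simp [pvScan, hc]
      rw [hstep] at h
      exact ih h (PySem.Set.nodup_add seen (a, b) hn)

lemma pvRow_eq_none_iff {cols : List Int} (hnd : cols.Nodup) :
    ∀ seen : PySem.Set (Int × Int), (pvRow seen cols = none ↔ ∃ p ∈ pvPairsList cols, p ∈ seen) := by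
  induction cols with
  | nil => intro seen; simp [pvRow, pvPairsList]
  | cons a rest ih =>
    intro seen
    rcases List.nodup_cons.mp hnd with ⟨ha, hnd'⟩
    rw [pvRow]
    cases hscan : pvScan a seen rest with
    | none =>
      rcases (pvScan_eq_none_iff hnd' seen).mp hscan with ⟨b, hb, hmem⟩
      refine iff_of_true rfl ⟨(a, b), ?_, hmem⟩
      simp only [pvPairsList, List.mem_append, List.mem_map]
      exact Or.inl ⟨b, hb, rfl⟩
    | some s =>
      have hmem := pvScan_eq_some_mem hscan
      have hnone : ¬ ∃ b ∈ rest, (a, b) ∈ seen := by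
        rw [← pvScan_eq_none_iff hnd' seen, hscan]; simp
      rw [ih hnd' s]
      simp only [pvPairsList, List.mem_append, List.mem_map]
      constructor
      · rintro ⟨p, hp, hps⟩
        rcases (hmem p).mp hps with hseen | ⟨b, hb, rfl⟩
        · exact ⟨p, Or.inr hp, hseen⟩
        · exact absurd (pvPairsList_mem_comps hp).1 ha
      · rintro ⟨p, ⟨b, hb, rfl⟩ | hp, hseen⟩
        · exact absurd ⟨b, hb, hseen⟩ hnone
        · exact ⟨p, hp, (hmem p).mpr (Or.inl hseen)⟩

lemma pvRow_eq_some_mem {cols : List Int} :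
    ∀ {seen s : PySem.Set (Int × Int)}, pvRow seen cols = some s →
      ∀ q, (q ∈ s ↔ q ∈ seen ∨ q ∈ pvPairsList cols) := by
  induction cols with
  | nil => intro seen s h q; simp only [pvRow, Option.some.injEq] at h; simp [← h, pvPairsList]
  | cons a rest ih =>
    intro seen s h q
    rw [pvRow] at h
    cases hscan : pvScan a seen rest with
    | none => rw [hscan] at h; simp at h
    | some s1 =>
      rw [hscan] at h
      rw [ih h q]
      have hmem := pvScan_eq_some_mem hscan
      simp only [pvPairsList, List.mem_append, List.mem_map, hmem q]
      constructor
      · rintro ((hq | ⟨b, hb, rfl⟩) | hq)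
        · exact Or.inl hq
        · exact Or.inr (Or.inl ⟨b, hb, rfl⟩)
        · exact Or.inr (Or.inr hq)
      · rintro (hq | ⟨b, hb, rfl⟩ | hq)
        · exact Or.inl (Or.inl hq)
        · exact Or.inl (Or.inr ⟨b, hb, rfl⟩)
        · exact Or.inr hq

lemma pvRow_eq_some_nodup {cols : List Int} :
    ∀ {seen s : PySem.Set (Int × Int)}, pvRow seen cols = some s → seen.Nodup → s.Nodup := by
  induction cols with
  | nil => intro seen s h hn; simp only [pvRow, Option.some.injEq] at h; exact h ▸ hn
  | cons a rest ih =>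
    intro seen s h hn
    rw [pvRow] at h
    cases hscan : pvScan a seen rest with
    | none => rw [hscan] at h; simp at h
    | some s1 => rw [hscan] at h; exact ih h (pvScan_eq_some_nodup hscan hn)

-- rows i and j both contain some pair of 1-columns
def pvShare (A : List (List Int)) (n i j : Int) : Prop :=
  ∃ p, p ∈ pvPairsList (pvColsOf n (PySem.List.pyGetD A i [])) ∧
       p ∈ pvPairsList (pvColsOf n (PySem.List.pyGetD A j []))

lemma pvShare_symm {A n i j} (h : pvShare A n i j) : pvShare A n j i := by
  rcases h with ⟨p, h1, h2⟩; exact ⟨p, h2, h1⟩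

lemma pvColsOf_pairwise (n : Int) (row : List Int) : (pvColsOf n row).Pairwise (· < ·) := by
  unfold pvColsOf
  rw [List.pairwise_map]
  exact List.Pairwise.sublist List.filter_sublist (PySem.List.pairwise_lt_enumerate row 0)

lemma pvColsOf_nodup (n : Int) (row : List Int) : (pvColsOf n row).Nodup :=
  (pvColsOf_pairwise n row).imp ne_of_lt

lemma pvRows_one_or {A : List (List Int)} {n : Int} {L : List Int} :
    ∀ seen, pvRows A n seen L = 1 ∨ pvRows A n seen L = -1 := by
  induction L with
  | nil => intro seen; simp [pvRows]
  | cons i is ih =>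
    intro seen
    rw [pvRows]
    cases pvRow seen (pvColsOf n (PySem.List.pyGetD A i [])) with
    | none => exact Or.inl rfl
    | some s => exact ih s

lemma pvRows_eq_one_iff {A : List (List Int)} {n : Int} {L : List Int} (hL : L.Nodup) :
    ∀ seen : PySem.Set (Int × Int), seen.Nodup →
      (pvRows A n seen L = 1 ↔
        (∃ i ∈ L, ∃ p ∈ pvPairsList (pvColsOf n (PySem.List.pyGetD A i [])), p ∈ seen) ∨
        (∃ i ∈ L, ∃ j ∈ L, i ≠ j ∧ pvShare A n i j)) := by
  induction L with
  | nil => intro seen _; simp [pvRows]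
  | cons i is ih =>
    intro seen hs
    rcases List.nodup_cons.mp hL with ⟨hi, hL'⟩
    rw [pvRows]
    have hcnd := pvColsOf_nodup n (PySem.List.pyGetD A i [])
    cases hrow : pvRow seen (pvColsOf n (PySem.List.pyGetD A i [])) with
    | none =>
      rcases (pvRow_eq_none_iff hcnd seen).mp hrow with ⟨p, hp, hseen⟩
      exact iff_of_true rfl (Or.inl ⟨i, by simp, p, hp, hseen⟩)
    | some s =>
      have hmem := pvRow_eq_some_mem hrow
      have hnone : ¬ ∃ p ∈ pvPairsList (pvColsOf n (PySem.List.pyGetD A i [])), p ∈ seen := by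
        rw [← pvRow_eq_none_iff hcnd seen, hrow]; simp
      rw [ih hL' s (pvRow_eq_some_nodup hrow hs)]
      constructor
      · rintro (⟨i', hi', p, hp, hps⟩ | ⟨i', hi', j, hj, hne, hsh⟩)
        · rcases (hmem p).mp hps with hseen | hPi
          · exact Or.inl ⟨i', List.mem_cons_of_mem _ hi', p, hp, hseen⟩
          · exact Or.inr ⟨i, List.mem_cons_self .., i', List.mem_cons_of_mem _ hi',
              fun h => hi (h ▸ hi'), ⟨p, hPi, hp⟩⟩
        · exact Or.inr ⟨i', List.mem_cons_of_mem _ hi', j, List.mem_cons_of_mem _ hj, hne, hsh⟩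
      · rintro (⟨i', hi', p, hp, hseen⟩ | ⟨i', hi', j, hj, hne, hsh⟩)
        · rcases List.mem_cons.mp hi' with rfl | hi'
          · exact absurd ⟨p, hp, hseen⟩ hnone
          · exact Or.inl ⟨i', hi', p, hp, (hmem p).mpr (Or.inl hseen)⟩
        · rcases List.mem_cons.mp hi' with rfl | hi'mem
          · rcases List.mem_cons.mp hj with rfl | hjmem
            · exact absurd rfl hne
            · rcases hsh with ⟨p, hpi, hpj⟩
              exact Or.inl ⟨j, hjmem, p, hpj, (hmem p).mpr (Or.inr hpi)⟩
          · rcases List.mem_cons.mp hj with rfl | hjmem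
            · rcases hsh with ⟨p, hpi, hpj⟩
              exact Or.inl ⟨i', hi'mem, p, hpi, (hmem p).mpr (Or.inr hpj)⟩
            · exact Or.inr ⟨i', hi'mem, j, hjmem, hne, hsh⟩

lemma alt_eq_one_iff (A : List (List Int)) :
    contains_square_alt A = 1 ↔
      ∃ i ∈ PySem.List.pyRange 1 (A.length : Int) 1,
        ∃ j ∈ PySem.List.pyRange 1 (A.length : Int) 1, i ≠ j ∧ pvShare A (A.length : Int) i j := by
  unfold contains_square_alt
  rw [pvRows_eq_one_iff (PySem.List.nodup_pyRange_one 1 (A.length : Int))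
        PySem.Set.empty List.nodup_nil]
  simp [PySem.Set.empty]

lemma alt_one_or (A : List (List Int)) :
    contains_square_alt A = 1 ∨ contains_square_alt A = -1 := by
  unfold contains_square_alt; exact pvRows_one_or _

lemma two_le_length_iff {m : List Int} (hnd : m.Nodup) :
    2 ≤ m.length ↔ ∃ a b : Int, a ∈ m ∧ b ∈ m ∧ a < b := by
  constructor
  · intro h
    match m, h with
    | a :: b :: t, _ =>
      have hne : a ≠ b := by
        rcases List.nodup_cons.mp hnd with ⟨ha, _⟩
        intro h; exact ha (h ▸ List.mem_cons_self ..)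
      rcases lt_or_gt_of_ne hne with hlt | hgt
      · exact ⟨a, b, by simp, by simp, hlt⟩
      · exact ⟨b, a, by simp, by simp, hgt⟩
  · rintro ⟨a, b, ha, hb, hab⟩
    by_contra h
    interval_cases hlen : m.length
    · simp [List.length_eq_zero_iff.mp hlen] at ha
    · rcases List.length_eq_one_iff.mp hlen with ⟨x, rfl⟩
      simp at ha hb
      exact absurd (ha ▸ hb ▸ hab) (lt_irrefl _)

lemma foldl_common (A : List (List Int)) (i j : Int) :
    (PySem.List.pyRange 1 (A.length : Int) 1).foldl (fun acc k =>
      if PySem.List.pyGetD (PySem.List.pyGetD A i []) k 0 == 1 &&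
         PySem.List.pyGetD (PySem.List.pyGetD A j []) k 0 == 1
      then acc + 1 else acc) 0
    = ((PySem.List.pyRange 1 (A.length : Int) 1).countP
        (fun k => pvEnt A i k == 1 && pvEnt A j k == 1) : Int) := by
  rw [PySem.List.foldl_if_add_one]
  simp [pvEnt]

-- the inner 'for j' loop of A's port, named for the proofs
def pvAinner (A : List (List Int)) (i : Int) : Option Int :=
  (PySem.List.pyRange (i + 1) (A.length : Int) 1).findSome? (fun j =>
    let common : Int := (PySem.List.pyRange 1 (A.length : Int) 1).foldl (fun acc k =>
      if PySem.List.pyGetD (PySem.List.pyGetD A i []) k 0 == 1 &&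
         PySem.List.pyGetD (PySem.List.pyGetD A j []) k 0 == 1
      then acc + 1 else acc) 0
    if 2 ≤ common then some (1 : Int) else none)

lemma contains_square_eq (A : List (List Int)) :
    contains_square A =
      match (PySem.List.pyRange 1 ((A.length : Int) - 1) 1).findSome? (pvAinner A) with
      | some v => v
      | none => -1 := rfl

lemma pvAinner_eq (A : List (List Int)) (i : Int) :
    pvAinner A i =
      (PySem.List.pyRange (i + 1) (A.length : Int) 1).findSome? (fun j =>
        if 2 ≤ ((PySem.List.pyRange 1 (A.length : Int) 1).countP
                  (fun k => pvEnt A i k == 1 && pvEnt A j k == 1) : Int)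
        then some (1 : Int) else none) := by
  unfold pvAinner
  congr 1
  funext j
  rw [foldl_common]

lemma a_eq_one_iff (A : List (List Int)) :
    contains_square A = 1 ↔
      ∃ i ∈ PySem.List.pyRange 1 ((A.length : Int) - 1) 1,
        ∃ j ∈ PySem.List.pyRange (i + 1) (A.length : Int) 1,
          2 ≤ (PySem.List.pyRange 1 (A.length : Int) 1).countP
                (fun k => pvEnt A i k == 1 && pvEnt A j k == 1) := by
  rw [contains_square_eq]
  cases hf : (PySem.List.pyRange 1 ((A.length : Int) - 1) 1).findSome? (pvAinner A) with
  | some v =>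
    rcases List.exists_of_findSome?_eq_some hf with ⟨i, hi, hinner⟩
    rw [pvAinner_eq] at hinner
    rcases List.exists_of_findSome?_eq_some hinner with ⟨j, hj, hif⟩
    split at hif
    case isTrue hcnt =>
      simp only [Option.some.injEq] at hif
      refine iff_of_true hif.symm ⟨i, hi, j, hj, ?_⟩
      exact_mod_cast hcnt
    case isFalse => simp at hif
  | none =>
    rw [List.findSome?_eq_none_iff] at hf
    constructor
    · intro h; simp at h
    · rintro ⟨i, hi, j, hj, hcnt⟩
      have h1 := hf i hi
      rw [pvAinner_eq, List.findSome?_eq_none_iff] at h1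
      have h2 := h1 j hj
      split at h2
      case isTrue => simp at h2
      case isFalse hc => exact absurd (by exact_mod_cast hcnt) hc

lemma a_one_or (A : List (List Int)) : contains_square A = 1 ∨ contains_square A = -1 := by
  rw [contains_square_eq]
  cases hf : (PySem.List.pyRange 1 ((A.length : Int) - 1) 1).findSome? (pvAinner A) with
  | some v =>
    rcases List.exists_of_findSome?_eq_some hf with ⟨i, hi, hinner⟩
    rw [pvAinner_eq] at hinner
    rcases List.exists_of_findSome?_eq_some hinner with ⟨j, hj, hif⟩
    split at hif
    · simp only [Option.some.injEq] at hif; exact Or.inl hif.symm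
    · simp at hif
  | none => exact Or.inr rfl

lemma pvColsOf_bounds {n : Int} {row : List Int} {k : Int} (h : k ∈ pvColsOf n row) :
    1 ≤ k ∧ k < n := by
  unfold pvColsOf at h
  simp only [List.mem_map, List.mem_filter] at h
  rcases h with ⟨p, ⟨_, hq⟩, rfl⟩
  simp only [Bool.and_eq_true, decide_eq_true_eq] at hq
  exact hq.1

lemma mem_pvColsOf {A : List (List Int)} (hpre : Pre_contains_square A)
    {i : Int} (k : Int) (hi1 : 1 ≤ i) (hi2 : i < (A.length : Int)) (hn : 2 < (A.length : Int)) :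
    k ∈ pvColsOf (A.length : Int) (PySem.List.pyGetD A i []) ↔
      1 ≤ k ∧ k < (A.length : Int) ∧ pvEnt A i k = 1 := by
  have hit : i.toNat < A.length := by omega
  have hrow : PySem.List.pyGetD A i [] = A[i.toNat] :=
    PySem.List.pyGetD_eq_getElem _ _ (by omega) hi2
  have hlt : i.toNat - 1 < (A.drop 1).length := by
    simp only [List.length_drop]; omega
  have hgd : (A.drop 1)[i.toNat - 1] = A[i.toNat] := by
    rw [List.getElem_drop]
    congr 1
    omega
  have hmem : A[i.toNat] ∈ A.drop 1 := hgd ▸ List.getElem_mem hlt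
  have hlen : (A.length : Int) ≤ (A[i.toNat].length : Int) := by
    exact_mod_cast hpre (by exact_mod_cast hn) _ hmem
  unfold pvColsOf pvEnt
  rw [hrow]
  simp only [List.mem_map, List.mem_filter, PySem.List.mem_enumerate_iff,
    Bool.and_eq_true, decide_eq_true_eq, beq_iff_eq]
  constructor
  · rintro ⟨p, ⟨⟨m, hm, rfl⟩, ⟨hk1, hk2⟩, hv⟩, hfst⟩
    simp only [zero_add] at hk1 hk2 hv hfst
    subst hfst
    refine ⟨hk1, hk2, ?_⟩
    rw [PySem.List.pyGetD_eq_getElem _ _ (by omega) (by exact_mod_cast hm)]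
    simpa using hv
  · rintro ⟨hk1, hk2, hent⟩
    have hklen : k.toNat < A[i.toNat].length := by omega
    refine ⟨(k, A[i.toNat][k.toNat]), ⟨⟨k.toNat, hklen, ?_⟩, ⟨hk1, hk2⟩, ?_⟩, rfl⟩
    · simp only [zero_add]
      congr 1
      omega
    · rw [PySem.List.pyGetD_eq_getElem _ _ (by omega) (by omega)] at hent
      simpa using hent

-- count-of-common-columns ≥ 2 ↔ the two rows share an ordered pair of common 1-columns
lemma cnt_iff_pair {A : List (List Int)} (i j : Int) :
    2 ≤ (PySem.List.pyRange 1 (A.length : Int) 1).countP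
          (fun k => pvEnt A i k == 1 && pvEnt A j k == 1) ↔
      ∃ a b : Int, a < b ∧ (1 ≤ a ∧ a < (A.length : Int) ∧ pvEnt A i a = 1 ∧ pvEnt A j a = 1) ∧
        (1 ≤ b ∧ b < (A.length : Int) ∧ pvEnt A i b = 1 ∧ pvEnt A j b = 1) := by
  rw [List.countP_eq_length_filter,
    two_le_length_iff (List.Nodup.filter _ (PySem.List.nodup_pyRange_one 1 (A.length : Int)))]
  simp only [List.mem_filter, PySem.List.mem_pyRange_one, Bool.and_eq_true, beq_iff_eq]
  constructor
  · rintro ⟨a, b, ⟨⟨ha1, ha2⟩, he1, he2⟩, ⟨⟨hb1, hb2⟩, he3, he4⟩, hab⟩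
    exact ⟨a, b, hab, ⟨ha1, ha2, he1, he2⟩, ⟨hb1, hb2, he3, he4⟩⟩
  · rintro ⟨a, b, hab, ⟨ha1, ha2, he1, he2⟩, ⟨hb1, hb2, he3, he4⟩⟩
    exact ⟨a, b, ⟨⟨ha1, ha2⟩, he1, he2⟩, ⟨⟨hb1, hb2⟩, he3, he4⟩, hab⟩

lemma share_iff {A : List (List Int)} (hpre : Pre_contains_square A)
    {i j : Int} (hi1 : 1 ≤ i) (hi2 : i < (A.length : Int))
    (hj1 : 1 ≤ j) (hj2 : j < (A.length : Int)) :
    pvShare A (A.length : Int) i j ↔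
      ∃ a b : Int, a < b ∧ (1 ≤ a ∧ a < (A.length : Int) ∧ pvEnt A i a = 1 ∧ pvEnt A j a = 1) ∧
        (1 ≤ b ∧ b < (A.length : Int) ∧ pvEnt A i b = 1 ∧ pvEnt A j b = 1) := by
  constructor
  · rintro ⟨⟨a, b⟩, hpi, hpj⟩
    rcases (mem_pvPairsList (pvColsOf_pairwise _ _) a b).mp hpi with ⟨hai, hbi, hab⟩
    rcases (mem_pvPairsList (pvColsOf_pairwise _ _) a b).mp hpj with ⟨haj, hbj, -⟩
    have hbnd := pvColsOf_bounds hai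
    have hbnd' := pvColsOf_bounds hbi
    have hn : 2 < (A.length : Int) := by omega
    rcases (mem_pvColsOf hpre a hi1 hi2 hn).mp hai with ⟨ha1, ha2, hea⟩
    rcases (mem_pvColsOf hpre b hi1 hi2 hn).mp hbi with ⟨hb1, hb2, heb⟩
    rcases (mem_pvColsOf hpre a hj1 hj2 hn).mp haj with ⟨-, -, hea'⟩
    rcases (mem_pvColsOf hpre b hj1 hj2 hn).mp hbj with ⟨-, -, heb'⟩
    exact ⟨a, b, hab, ⟨ha1, ha2, hea, hea'⟩, ⟨hb1, hb2, heb, heb'⟩⟩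
  · rintro ⟨a, b, hab, ⟨ha1, ha2, hea, hea'⟩, ⟨hb1, hb2, heb, heb'⟩⟩
    have hn : 2 < (A.length : Int) := by omega
    refine ⟨(a, b), ?_, ?_⟩
    · exact (mem_pvPairsList (pvColsOf_pairwise _ _) a b).mpr
        ⟨(mem_pvColsOf hpre a hi1 hi2 hn).mpr ⟨ha1, ha2, hea⟩,
         (mem_pvColsOf hpre b hi1 hi2 hn).mpr ⟨hb1, hb2, heb⟩, hab⟩
    · exact (mem_pvPairsList (pvColsOf_pairwise _ _) a b).mpr
        ⟨(mem_pvColsOf hpre a hj1 hj2 hn).mpr ⟨ha1, ha2, hea'⟩,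
         (mem_pvColsOf hpre b hj1 hj2 hn).mpr ⟨hb1, hb2, heb'⟩, hab⟩

lemma sq_link (A : List (List Int)) (hpre : Pre_contains_square A) :
    (∃ i ∈ PySem.List.pyRange 1 ((A.length : Int) - 1) 1,
      ∃ j ∈ PySem.List.pyRange (i + 1) (A.length : Int) 1,
        2 ≤ (PySem.List.pyRange 1 (A.length : Int) 1).countP
              (fun k => pvEnt A i k == 1 && pvEnt A j k == 1)) ↔
    (∃ i ∈ PySem.List.pyRange 1 (A.length : Int) 1,
      ∃ j ∈ PySem.List.pyRange 1 (A.length : Int) 1,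
        i ≠ j ∧ pvShare A (A.length : Int) i j) := by
  constructor
  · rintro ⟨i, hi, j, hj, hcnt⟩
    rw [PySem.List.mem_pyRange_one] at hi hj
    have hsh := (share_iff hpre (by omega) (by omega) (by omega) (by omega)).mpr
      ((cnt_iff_pair i j).mp hcnt)
    exact ⟨i, PySem.List.mem_pyRange_one.mpr (by omega), j,
      PySem.List.mem_pyRange_one.mpr (by omega), by omega, hsh⟩
  · rintro ⟨i, hi, j, hj, hne, hsh⟩
    rw [PySem.List.mem_pyRange_one] at hi hj
    rcases lt_or_gt_of_ne hne with hlt | hgt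
    · have hcnt := (cnt_iff_pair i j).mpr
        ((share_iff hpre (by omega) (by omega) (by omega) (by omega)).mp hsh)
      exact ⟨i, PySem.List.mem_pyRange_one.mpr (by omega), j,
        PySem.List.mem_pyRange_one.mpr (by omega), hcnt⟩
    · have hcnt := (cnt_iff_pair j i).mpr
        ((share_iff hpre (by omega) (by omega) (by omega) (by omega)).mp (pvShare_symm hsh))
      exact ⟨j, PySem.List.mem_pyRange_one.mpr (by omega), i,
        PySem.List.mem_pyRange_one.mpr (by omega), hcnt⟩

theorem contains_square_spec : Claim_equal_contains_square := by
  intro A _ hpre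
  unfold Spec_contains_square
  have hiff : contains_square A = 1 ↔ contains_square_alt A = 1 :=
    (a_eq_one_iff A).trans ((sq_link A hpre).trans (alt_eq_one_iff A).symm)
  rcases a_one_or A with h1 | h1 <;> rcases alt_one_or A with h2 | h2 <;> rw [h1, h2]
  · exact absurd (hiff.mp h1) (by rw [h2]; decide)
  · exact absurd (hiff.mpr h2) (by rw [h1]; decide)
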